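-- pv_equiv track=rewrite | github.com/Giusseppe-97/Codewars | Codewars_rgb_to_hex_13.py | rgb
-- ===== SOURCE A (Python) =====
-- def rgb(r, g, b):
--
--     colors = [r,g,b]
--     cols = ["","",""]
--     for i in range(len(colors)):
--
--         if colors[i]//16 == 10:
--             cols[i] = "A"
--         elif colors[i]//16 == 11:
--             cols[i] = "B"
--         elif colors[i]//16 == 12:
--             cols[i] = "C"
--         elif colors[i]//16 == 13:
--             cols[i] = "D"
--         elif colors[i]//16 == 14:
--             cols[i] = "E"
--         elif colors[i]//16 == 15:
--             cols[i] = "F"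
--         else:
--             cols[i] = str(colors[i]//16)
--
--         if colors[i]%16 == 10:
--             cols[i] = cols[i] + "A"
--         elif colors[i]%16 == 11:
--             cols[i] = cols[i] + "B"
--         elif colors[i]%16 == 12:
--             cols[i] = cols[i] + "C"
--         elif colors[i]%16 == 13:
--             cols[i] =  cols[i] + "D"
--         elif colors[i]%16 == 14:
--             cols[i] = cols[i] + "E"
--         elif colors[i]%16 == 15:
--             cols[i] = cols[i] + "F"
--         else:
--             cols[i] = cols[i]  + str(colors[i]%16 )
--
--         if colors[i]<0:
--             cols[i] = str(0)+str(0)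
--         elif colors[i]>255:
--             cols[i] = "F" + "F"
--
--     return cols[0] + cols[1] + cols[2]
-- ===== SOURCE B (Python) =====
-- def rgb(r, g, b):
--     return "".join("%02X" % max(0, min(255, c)) for c in (r, g, b))
-- ===== Notes on version B (the rewrite author's own statement) =====
-- stated objective: idiomatic
-- what changed: Replaces A's hand-rolled per-nibble branch table and post-hoc '00'/'FF' overrides with a clamp-then-'%02X'-format pipeline joined over the three channels.
import Mathlib
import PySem

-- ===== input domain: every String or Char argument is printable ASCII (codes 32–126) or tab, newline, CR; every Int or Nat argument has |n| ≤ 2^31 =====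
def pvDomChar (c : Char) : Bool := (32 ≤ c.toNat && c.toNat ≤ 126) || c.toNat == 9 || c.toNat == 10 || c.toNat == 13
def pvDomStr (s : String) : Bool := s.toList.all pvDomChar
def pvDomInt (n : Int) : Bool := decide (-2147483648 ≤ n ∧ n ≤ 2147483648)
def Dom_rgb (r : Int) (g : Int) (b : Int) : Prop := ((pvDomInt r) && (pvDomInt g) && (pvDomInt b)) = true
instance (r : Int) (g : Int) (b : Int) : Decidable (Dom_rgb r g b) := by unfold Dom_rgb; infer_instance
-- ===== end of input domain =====

-- B: clamp each channel then format as two uppercase hex digits ('%02X'), instead of A's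
-- per-nibble branch table with post-hoc "00"/"FF" overrides. Same return value for all int inputs.

-- ===== PORT A =====
-- per-iteration body of A's loop over colors (the three cols[i] assignments in order)
def rgbStepA (c : Int) : String :=
  let hi :=
    if PySem.Int.floordiv c 16 == 10 then "A"
    else if PySem.Int.floordiv c 16 == 11 then "B"
    else if PySem.Int.floordiv c 16 == 12 then "C"
    else if PySem.Int.floordiv c 16 == 13 then "D"
    else if PySem.Int.floordiv c 16 == 14 then "E"
    else if PySem.Int.floordiv c 16 == 15 then "F"
    else PySem.Int.toStr (PySem.Int.floordiv c 16)
  let s :=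
    if PySem.Int.mod c 16 == 10 then hi ++ "A"
    else if PySem.Int.mod c 16 == 11 then hi ++ "B"
    else if PySem.Int.mod c 16 == 12 then hi ++ "C"
    else if PySem.Int.mod c 16 == 13 then hi ++ "D"
    else if PySem.Int.mod c 16 == 14 then hi ++ "E"
    else if PySem.Int.mod c 16 == 15 then hi ++ "F"
    else hi ++ PySem.Int.toStr (PySem.Int.mod c 16)
  if c < 0 then PySem.Int.toStr 0 ++ PySem.Int.toStr 0
  else if c > 255 then "F" ++ "F"
  else s

def rgb (r : Int) (g : Int) (b : Int) : String :=
  let colors : List Int := [r, g, b]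
  let cols : List String := colors.foldl (fun acc c => acc ++ [rgbStepA c]) []
  String.join cols

-- ===== PORT B =====
-- format(c, '02X') for 0 <= c <= 255: two uppercase hex digits from a digit table
def hexDigitB (n : Int) : String :=
  (["0","1","2","3","4","5","6","7","8","9","A","B","C","D","E","F"].getD n.toNat "")

def fmt02XB (c : Int) : String := hexDigitB (c / 16) ++ hexDigitB (c % 16)

def clampB (c : Int) : Int := max 0 (min 255 c)

def rgb_alt (r : Int) (g : Int) (b : Int) : String :=
  String.join (([r, g, b]).map (fun c => fmt02XB (clampB c)))

-- ===== PRECONDITION & SPEC =====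
def Spec_rgb (r : Int) (g : Int) (b : Int) (out : String) : Prop := out = rgb_alt r g b
instance (r : Int) (g : Int) (b : Int) (out : String) : Decidable (Spec_rgb r g b out) := by unfold Spec_rgb; infer_instance

-- ===== CLAIM (what is proved, stated in full; the proofs are below) =====
def Claim_equal_rgb : Prop := ∀ (r : Int) (g : Int) (b : Int), Dom_rgb r g b → Spec_rgb r g b (rgb r g b)

-- ===== LEMMAS AND PROOFS =====

-- ===== VERDICT (by name: the statement is the Claim_ definition above) =====
theorem step_eq (c : Int) : rgbStepA c = fmt02XB (clampB c) := by
  rcases lt_or_ge c 0 with h | h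
  · have : clampB c = 0 := by unfold clampB; omega
    simp [rgbStepA, this, h, fmt02XB, hexDigitB]
    decide
  · rcases lt_or_ge (255 : Int) c with h2 | h2
    · have : clampB c = 255 := by unfold clampB; omega
      simp [rgbStepA, this, fmt02XB, hexDigitB]
      simp [show ¬ c < 0 by omega, show c > 255 from h2]
    · have hc : clampB c = c := by unfold clampB; omega
      rw [hc]
      interval_cases c <;> decide

theorem rgb_spec : Claim_equal_rgb := by
  intro r g b _
  unfold Spec_rgb rgb rgb_alt
  simp [step_eq, String.join]
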